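-- pv_equiv track=rewrite | github.com/ktsujimoto0624-cmd/mahjong-ai | mahjong/yaku.py | _count_same_shuntsu
-- ===== SOURCE A (Python) =====
-- def _count_same_shuntsu(mentsu):
--     """同じ順子の対(一盃口/二盃口)を数える"""
--     shuntsu = [t for mt, t in mentsu if mt == "shuntsu"]
--     count = 0
--     used = [False] * len(shuntsu)
--     for i in range(len(shuntsu)):
--         if used[i]:
--             continue
--         for j in range(i + 1, len(shuntsu)):
--             if not used[j] and shuntsu[i] == shuntsu[j]:
--                 count += 1
--                 used[i] = True
--                 used[j] = True
--                 break
--     return count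
-- ===== SOURCE B (Python) =====
-- def _count_same_shuntsu(mentsu):
--     """同じ順子の対(一盃口/二盃口)を数える"""
--     counts = {}
--     for mt, t in mentsu:
--         if mt == "shuntsu":
--             key = tuple(t)
--             counts[key] = counts.get(key, 0) + 1
--     return sum(c // 2 for c in counts.values())
-- ===== Notes on version B (the rewrite author's own statement) =====
-- stated objective: simpler
-- what changed: Replaces the greedy quadratic pairwise matching with a `used` flag array by a single-pass frequency dictionary keyed on tuple(t), returning sum(c // 2) over the counts.
import Mathlib
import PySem

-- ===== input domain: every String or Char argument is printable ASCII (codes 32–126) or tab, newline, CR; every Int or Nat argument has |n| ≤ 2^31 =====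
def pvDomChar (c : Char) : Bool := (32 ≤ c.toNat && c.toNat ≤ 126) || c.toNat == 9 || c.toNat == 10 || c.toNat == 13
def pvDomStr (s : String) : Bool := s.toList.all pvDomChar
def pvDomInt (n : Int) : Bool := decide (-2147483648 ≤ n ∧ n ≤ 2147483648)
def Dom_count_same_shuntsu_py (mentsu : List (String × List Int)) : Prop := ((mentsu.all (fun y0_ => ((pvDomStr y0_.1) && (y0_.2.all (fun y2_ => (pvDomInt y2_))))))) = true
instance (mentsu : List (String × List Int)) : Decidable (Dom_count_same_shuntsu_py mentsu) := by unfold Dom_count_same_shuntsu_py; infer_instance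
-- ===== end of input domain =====

-- B replaces A's quadratic greedy pairwise matching over a `used` flag array by a single
-- frequency dictionary keyed on the sequence, returning the sum of count // 2 (simpler).

-- ===== PORT A =====
-- A's inner 'for j in range(i+1, n): … break' loop, as recursion over the j list
def pvInnerA (shuntsu : List (List Int)) (i : Int) (js : List Int)
    (count : Int) (used : List Bool) : Int × List Bool :=
  match js with
  | [] => (count, used)
  | j :: rest =>
    if (!(PySem.List.pyGetD used j false))
        && (PySem.List.pyGetD shuntsu i [] == PySem.List.pyGetD shuntsu j []) then
      (count + 1, PySem.List.pySetD (PySem.List.pySetD used i true) j true)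
    else
      pvInnerA shuntsu i rest count used

def count_same_shuntsu_py (mentsu : List (String × List Int)) : Int :=
  let shuntsu := (mentsu.filter (fun p => p.1 == "shuntsu")).map Prod.snd
  let n : Int := PySem.List.len shuntsu
  let res :=
    (PySem.List.pyRange 0 n 1).foldl
      (fun (st : Int × List Bool) i =>
        if PySem.List.pyGetD st.2 i false then st
        else pvInnerA shuntsu i (PySem.List.pyRange (i + 1) n 1) st.1 st.2)
      (0, List.replicate shuntsu.length false)
  res.1

-- ===== PORT B =====
def count_same_shuntsu_py_alt (mentsu : List (String × List Int)) : Int :=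
  let counts : PySem.Dict (List Int) Int :=
    mentsu.foldl
      (fun d p =>
        if p.1 == "shuntsu" then d.insert p.2 (d.getD p.2 0 + 1) else d)
      PySem.Dict.empty
  (counts.values.map (fun c => PySem.Int.floordiv c 2)).sum

-- ===== PRECONDITION & SPEC =====
def Spec_count_same_shuntsu_py (mentsu : List (String × List Int)) (out : Int) : Prop := out = count_same_shuntsu_py_alt mentsu
instance (mentsu : List (String × List Int)) (out : Int) : Decidable (Spec_count_same_shuntsu_py mentsu out) := by unfold Spec_count_same_shuntsu_py; infer_instance

-- ===== CLAIM (what is proved, stated in full; the proofs are below) =====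
def Claim_equal_count_same_shuntsu_py : Prop := ∀ (mentsu : List (String × List Int)), Dom_count_same_shuntsu_py mentsu → Spec_count_same_shuntsu_py mentsu (count_same_shuntsu_py mentsu)

-- ===== LEMMAS AND PROOFS =====

-- the values of the not-yet-used entries of a (value, used-flag) list
def pvMasked (zs : List (List Int × Bool)) : List (List Int) :=
  (zs.filter (fun p => !p.2)).map Prod.fst

-- abstract form of A's inner loop on the (value, flag) suffix: mark the first
-- unused entry equal to x, or report that there is none
def pvMarkFirst (x : List Int) (zs : List (List Int × Bool)) :
    Option (List (List Int × Bool)) :=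
  match zs with
  | [] => none
  | (v, b) :: rest =>
    if !b && (v == x) then some ((v, true) :: rest)
    else (pvMarkFirst x rest).map ((v, b) :: ·)

-- abstract form of A's whole greedy pairing
def pvGreedy : List (List Int) → Nat
  | [] => 0
  | x :: xs => if x ∈ xs then pvGreedy (xs.erase x) + 1 else pvGreedy xs
termination_by xs => xs.length
decreasing_by
  · have h := List.length_erase_of_mem (by assumption : x ∈ xs)
    have h2 : 0 < xs.length := List.length_pos_of_mem (by assumption)
    simp only [List.length_cons, h]; omega
  · simp only [List.length_cons]; omega

-- reference count: over a key list D, the sum of (occurrence count / 2)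
def pvPairSum (D : List (List Int)) (ys : List (List Int)) : Nat :=
  (D.map (fun v => ys.count v / 2)).sum

theorem pvMasked_nil : pvMasked [] = [] := rfl

theorem pvMasked_cons_true (v : List Int) (rest : List (List Int × Bool)) :
    pvMasked ((v, true) :: rest) = pvMasked rest := rfl

theorem pvMasked_cons_false (v : List Int) (rest : List (List Int × Bool)) :
    pvMasked ((v, false) :: rest) = v :: pvMasked rest := rfl

theorem pvMarkFirst_none_iff (x : List Int) (zs : List (List Int × Bool)) :
    pvMarkFirst x zs = none ↔ x ∉ pvMasked zs := by
  induction zs with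
  | nil => simp [pvMarkFirst, pvMasked_nil]
  | cons p rest ih =>
    obtain ⟨v, b⟩ := p
    cases b with
    | true => simpa [pvMarkFirst, pvMasked_cons_true, Option.map_eq_none_iff] using ih
    | false =>
      by_cases hv : v = x
      · subst hv; simp [pvMarkFirst, pvMasked_cons_false]
      · simp [pvMarkFirst, pvMasked_cons_false, hv, Option.map_eq_none_iff, Ne.symm hv, ih]

theorem pvMarkFirst_some (x : List Int) (zs zs' : List (List Int × Bool))
    (h : pvMarkFirst x zs = some zs') :
    x ∈ pvMasked zs ∧ zs'.map Prod.fst = zs.map Prod.fst ∧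
      pvMasked zs' = (pvMasked zs).erase x := by
  induction zs generalizing zs' with
  | nil => simp [pvMarkFirst] at h
  | cons p rest ih =>
    obtain ⟨v, b⟩ := p
    by_cases hc : (!b && (v == x)) = true
    · obtain ⟨hb, hv⟩ := by simpa using hc
      subst hb; subst hv
      simp [pvMarkFirst] at h
      subst h
      simp [pvMasked_cons_false, pvMasked_cons_true, List.erase_cons_head]
    · simp [pvMarkFirst, hc] at h
      obtain ⟨w, hw, hzs'⟩ := h
      obtain ⟨hx, hfst, hmask⟩ := ih w hw
      subst hzs'
      cases b with
      | true =>
        exact ⟨by simpa [pvMasked_cons_true] using hx, by simp [hfst],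
          by simpa [pvMasked_cons_true] using hmask⟩
      | false =>
        have hv : v ≠ x := by simpa using hc
        refine ⟨by simp [pvMasked_cons_false, hx], by simp [hfst], ?_⟩
        rw [pvMasked_cons_false, pvMasked_cons_false, hmask,
          List.erase_cons_tail (by simp [hv])]

theorem pvSum_bump (D : List (List Int)) (x : List Int) (f g : List Int → Nat)
    (hnd : D.Nodup) (hx : x ∈ D) (hfx : f x = g x + 1)
    (hne : ∀ v, v ≠ x → f v = g v) :
    (D.map f).sum = (D.map g).sum + 1 := by
  induction D with
  | nil => simp at hx
  | cons d D' ih =>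
    rcases List.mem_cons.mp hx with hdx | hx'
    · subst hdx
      have hnotin : x ∉ D' := (List.nodup_cons.mp hnd).1
      have hmap : D'.map f = D'.map g := by
        apply List.map_congr_left
        intro v hv
        exact hne v (fun hvx => hnotin (hvx ▸ hv))
      simp [hmap, hfx]; omega
    · have hd : d ≠ x := fun hdx => (List.nodup_cons.mp hnd).1 (hdx ▸ hx')
      have hrec := ih (List.nodup_cons.mp hnd).2 hx'
      simp [hne d hd, hrec]; omega

theorem pvGreedy_eq_pairSum_aux (n : Nat) :
    ∀ ys : List (List Int), ys.length ≤ n → ∀ D : List (List Int), D.Nodup →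
      (∀ v ∈ ys, v ∈ D) → pvGreedy ys = pvPairSum D ys := by
  induction n with
  | zero =>
    intro ys hlen D _ _
    have : ys = [] := List.length_eq_zero_iff.mp (Nat.le_zero.mp hlen)
    subst this; simp [pvGreedy, pvPairSum]
  | succ n ih =>
    intro ys hlen D hnd hsub
    match ys with
    | [] => simp [pvGreedy, pvPairSum]
    | x :: xs =>
      have hxs : xs.length ≤ n := by simpa using hlen
      by_cases hmem : x ∈ xs
      · rw [pvGreedy, if_pos hmem]
        have hlen' : (xs.erase x).length ≤ n := by
          have := List.length_erase_of_mem hmem; omega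
        have hsub' : ∀ v ∈ xs.erase x, v ∈ D := fun v hv =>
          hsub v (List.mem_cons_of_mem x (List.mem_of_mem_erase hv))
        rw [ih (xs.erase x) hlen' D hnd hsub']
        have hc : 1 ≤ xs.count x := List.one_le_count_iff.mpr hmem
        unfold pvPairSum
        rw [pvSum_bump D x (fun v => (x :: xs).count v / 2)
            (fun v => (xs.erase x).count v / 2) hnd (hsub x List.mem_cons_self)
            (by simp only; rw [List.count_cons_self, List.count_erase_self]; omega)
            (fun v hv => by
              simp [List.count_cons, List.count_erase_of_ne (Ne.symm hv), hv, Ne.symm hv])]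
      · rw [pvGreedy, if_neg hmem,
          ih xs hxs D hnd (fun v hv => hsub v (List.mem_cons_of_mem x hv))]
        unfold pvPairSum
        congr 1
        apply List.map_congr_left
        intro v _
        by_cases hvx : v = x
        · subst hvx
          rw [List.count_cons_self, List.count_eq_zero.mpr hmem]
        · simp [Ne.symm hvx]

theorem pvGreedy_cons_mem (x : List Int) (xs : List (List Int)) (h : x ∈ xs) :
    pvGreedy (x :: xs) = pvGreedy (xs.erase x) + 1 := by
  rw [pvGreedy]; simp [h]

theorem pvGreedy_cons_not_mem (x : List Int) (xs : List (List Int)) (h : x ∉ xs) :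
    pvGreedy (x :: xs) = pvGreedy xs := by
  rw [pvGreedy]; simp [h]

theorem pvInner_bridge (s : List (List Int)) (used : List Bool) (count : Int)
    (k : Nat) (hk : k < s.length) (hlen : used.length = s.length) :
    ∀ t m : Nat, s.length - m = t → k < m → m ≤ s.length →
      pvInnerA s (↑k) (PySem.List.pyRange (↑m) (↑s.length) 1) count used =
        (match pvMarkFirst s[k] ((s.drop m).zip (used.drop m)) with
         | none => (count, used)
         | some zs' => (count + 1, (used.take m ++ zs'.map Prod.snd).set k true)) := by
  intro t
  induction t with
  | zero =>
    intro m ht hkm hm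
    have hms : m = s.length := by omega
    subst hms
    have hnil : PySem.List.pyRange (↑s.length) (↑s.length) 1 = [] := by
      simp [PySem.List.pyRange]
    rw [hnil, List.drop_length]
    simp [pvInnerA, pvMarkFirst]
  | succ t ih =>
    intro m ht hkm hm
    have hmlt : m < s.length := by omega
    have hml : m < used.length := by omega
    have hcast : ((m : Int) + 1) = ((m + 1 : Nat) : Int) := by push_cast; ring
    have hzip : (s.drop m).zip (used.drop m) =
        (s[m], used[m]) :: ((s.drop (m+1)).zip (used.drop (m+1))) := by
      rw [List.drop_eq_getElem_cons hmlt, List.drop_eq_getElem_cons hml,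
        List.zip_cons_cons]
    have hsnd : ((s.drop (m+1)).zip (used.drop (m+1))).map Prod.snd = used.drop (m+1) := by
      apply List.map_snd_zip
      simp [hlen]
    rw [PySem.List.pyRange_one_cons (by exact_mod_cast hmlt), pvInnerA, hzip]
    have hget_used : PySem.List.pyGetD used (↑m) false = used[m] := by simp [hml]
    have hget_k : PySem.List.pyGetD s (↑k) ([] : List Int) = s[k] := by simp [hk]
    have hget_m : PySem.List.pyGetD s (↑m) ([] : List Int) = s[m] := by simp [hmlt]
    rw [hget_used, hget_k, hget_m]
    by_cases hu : used[m] = true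
    · -- used[m]: condition false, skip to m+1
      rw [hu]
      simp only [Bool.not_true, Bool.false_and, pvMarkFirst]
      rw [hcast, ih (m+1) (by omega) (by omega) (by omega)]
      cases hmf : pvMarkFirst s[k] ((s.drop (m+1)).zip (used.drop (m+1))) with
      | none => simp
      | some w =>
        simp only [Bool.false_and, Option.map_some]
        rw [List.take_succ_eq_append_getElem hml, hu]
        simp [List.append_assoc]
    · simp only [Bool.not_eq_true] at hu
      rw [hu]
      by_cases hv : s[m] = s[k]
      · -- match found at j = m
        have hbeq : (s[k] == s[m]) = true := by simp [hv]
        rw [hbeq]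
        simp only [Bool.not_false, Bool.true_and, pvMarkFirst]
        have hbeq' : (s[m] == s[k]) = true := by simp [hv]
        simp only [Bool.not_false, hbeq', if_true]
        have h1 : PySem.List.pySetD used (↑k) true = used.set k true := by simp
        have h2 : PySem.List.pySetD (used.set k true) (↑m) true =
            (used.set k true).set m true := by simp
        rw [h1, h2]
        have h3 : (used.set k true).set m true = (used.set m true).set k true :=
          List.set_comm true true (by omega)
        rw [h3, List.set_eq_take_cons_drop true hml]
        simp [hsnd]
      · have hbeq : (s[k] == s[m]) = false := by simp [Ne.symm hv]
        rw [hbeq]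
        simp only [Bool.and_false, pvMarkFirst]
        have hbeq' : (s[m] == s[k]) = false := by simp [hv]
        simp only [Bool.not_false, Bool.true_and, hbeq']
        rw [hcast, ih (m+1) (by omega) (by omega) (by omega)]
        cases hmf : pvMarkFirst s[k] ((s.drop (m+1)).zip (used.drop (m+1))) with
        | none => simp
        | some w =>
          simp only [Option.map_some]
          rw [List.take_succ_eq_append_getElem hml, hu]
          simp [List.append_assoc]

theorem pvOuter_bridge (s : List (List Int)) :
    ∀ t k, ∀ (count : Int) (used : List Bool), s.length - k = t → k ≤ s.length →
      used.length = s.length →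
      ((PySem.List.pyRange (↑k) (↑s.length) 1).foldl
        (fun (st : Int × List Bool) i =>
          if PySem.List.pyGetD st.2 i false then st
          else pvInnerA s i (PySem.List.pyRange (i + 1) (↑s.length) 1) st.1 st.2)
        (count, used)).1
      = count + ↑(pvGreedy (pvMasked ((s.drop k).zip (used.drop k)))) := by
  intro t
  induction t with
  | zero =>
    intro k count used ht hks hlen
    have hks' : k = s.length := by omega
    subst hks'
    have hnil : PySem.List.pyRange (↑s.length) (↑s.length) 1 = [] := by
      simp [PySem.List.pyRange]
    rw [hnil, List.drop_length]
    simp [pvMasked_nil, pvGreedy]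
  | succ t ih =>
    intro k count used ht hks hlen
    have hklt : k < s.length := by omega
    have hkl : k < used.length := by omega
    have hcast : ((k : Int) + 1) = ((k + 1 : Nat) : Int) := by push_cast; ring
    have hzip : (s.drop k).zip (used.drop k) =
        (s[k], used[k]) :: ((s.drop (k+1)).zip (used.drop (k+1))) := by
      rw [List.drop_eq_getElem_cons hklt, List.drop_eq_getElem_cons hkl,
        List.zip_cons_cons]
    rw [PySem.List.pyRange_one_cons (by exact_mod_cast hklt), List.foldl_cons, hzip]
    have hget_used : PySem.List.pyGetD used (↑k) false = used[k] := by simp [hkl]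
    simp only [hget_used]
    by_cases hu : used[k] = true
    · rw [hu, if_pos rfl, hcast, ih (k+1) count used (by omega) (by omega) hlen]
      rw [pvMasked_cons_true]
    · simp only [Bool.not_eq_true] at hu
      rw [hu, if_neg (by simp)]
      rw [hcast,
        pvInner_bridge s used count k hklt hlen (s.length - (k+1)) (k+1) rfl
          (by omega) (by omega)]
      cases hmf : pvMarkFirst s[k] ((s.drop (k+1)).zip (used.drop (k+1))) with
      | none =>
        simp only
        rw [ih (k+1) count used (by omega) (by omega) hlen,
          pvMasked_cons_false,
          pvGreedy_cons_not_mem _ _ ((pvMarkFirst_none_iff _ _).mp hmf)]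
      | some w =>
        obtain ⟨hx, hfst, hmask⟩ := pvMarkFirst_some _ _ _ hmf
        have htail_len : ((s.drop (k+1)).zip (used.drop (k+1))).length = s.length - (k+1) := by
          simp [hlen]
        have hwlen : w.length = s.length - (k+1) := by
          have := congrArg List.length hfst
          simpa [htail_len] using this
        have htake : (used.take (k+1)).length = k + 1 := by
          simp [hlen]; omega
        have hulen : ((used.take (k+1) ++ w.map Prod.snd).set k true).length = s.length := by
          simp [htake, hwlen]; omega
        have hdrop : ((used.take (k+1) ++ w.map Prod.snd).set k true).drop (k+1)
            = w.map Prod.snd := by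
          rw [List.drop_set_of_lt (by omega)]
          have := List.drop_left (l₁ := used.take (k+1)) (l₂ := w.map Prod.snd)
          rwa [htake] at this
        have hwfst : w.map Prod.fst = s.drop (k+1) := by
          rw [hfst]
          apply List.map_fst_zip
          simp [hlen]
        simp only
        rw [ih (k+1) (count + 1) _ (by omega) (by omega) hulen, hdrop]
        have hzw : (s.drop (k+1)).zip (w.map Prod.snd) = w := by
          rw [← hwfst]
          exact Eq.symm (List.zip_of_prod rfl rfl)
        rw [hzw, hmask, pvMasked_cons_false,
          pvGreedy_cons_mem _ _ hx]
        push_cast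
        ring

theorem pvMasked_zip_replicate (s : List (List Int)) :
    pvMasked (s.zip (List.replicate s.length false)) = s := by
  induction s with
  | nil => rfl
  | cons x xs ih =>
    simp only [List.length_cons, List.replicate_succ, List.zip_cons_cons,
      pvMasked_cons_false, ih]

theorem pvA_eq (mentsu : List (String × List Int)) :
    count_same_shuntsu_py mentsu =
      ↑(pvGreedy ((mentsu.filter (fun p => p.1 == "shuntsu")).map Prod.snd)) := by
  simp only [count_same_shuntsu_py, PySem.List.len_eq]
  set s := (mentsu.filter (fun p => p.1 == "shuntsu")).map Prod.snd with hs
  have h := pvOuter_bridge s s.length 0 0 (List.replicate s.length false)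
    (by omega) (by omega) (by simp)
  simp only [Nat.cast_zero, List.drop_zero] at h
  rw [h, pvMasked_zip_replicate]
  ring

theorem pvB_eq (mentsu : List (String × List Int)) :
    count_same_shuntsu_py_alt mentsu =
      ↑(pvPairSum
          (PySem.Set.ofList ((mentsu.filter (fun p => p.1 == "shuntsu")).map Prod.snd))
          ((mentsu.filter (fun p => p.1 == "shuntsu")).map Prod.snd)) := by
  simp only [count_same_shuntsu_py_alt]
  rw [PySem.List.foldl_if_eq_foldl_filter]
  rw [← List.foldl_map (f := Prod.snd)
    (g := fun (d : PySem.Dict (List Int) Int) x => d.insert x (d.getD x 0 + 1))]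
  rw [PySem.Dict.foldl_insert_getD_add_one_eq_counter]
  set s := (mentsu.filter (fun p => p.1 == "shuntsu")).map Prod.snd with hs
  simp only [PySem.Dict.values, PySem.Dict.items_counter, List.map_map]
  unfold pvPairSum
  rw [Nat.cast_list_sum, List.map_map]
  congr 1
  apply List.map_congr_left
  intro v _
  simp only [Function.comp_apply]
  exact_mod_cast PySem.Int.floordiv_natCast (s.count v) 2

-- ===== VERDICT (by name: the statement is the Claim_ definition above) =====
theorem count_same_shuntsu_py_spec : Claim_equal_count_same_shuntsu_py := by
  intro mentsu _
  unfold Spec_count_same_shuntsu_py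
  rw [pvA_eq, pvB_eq]
  congr 1
  exact pvGreedy_eq_pairSum_aux _ _ le_rfl _
    (PySem.Set.nodup_ofList _) (fun v hv => (PySem.Set.mem_ofList _ _).mpr hv)
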